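-- pv_equiv track=rewrite | github.com/keyshark5294/Russian-school | EGE/lomonosovolimpiada/task1.py | all_to_one_steps
-- ===== SOURCE A (Python) =====
-- def collatz_transform(a):
--     """Применяет функцию f(n) ко всем элементам массива."""
--     for i in range(len(a)):
--         if a[i] % 2 == 0:
--             a[i] //= 2  # Чётное число
--         else:
--             a[i] = 3 * a[i] + 1  # Нечётное число
--     return a
--
-- def all_to_one_steps(arr):
--     """Вычисляет количество шагов для преобразования массива в единицы."""
--     seen_states = set()  # Храним состояния для проверки циклов
--     steps = 0
--
--     while True:
--         if all(x == 1 for x in arr):  # Если все элементы равны 1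
--             return steps
--         if tuple(arr) in seen_states:  # Если встретили повторяющееся состояние
--             return -1
--         seen_states.add(tuple(arr))  # Сохраняем текущее состояние
--         arr = collatz_transform(arr)  # Применяем функцию ко всему массиву
--         steps += 1
-- ===== SOURCE B (Python) =====
-- def all_to_one_steps(arr):
--     """B: each element evolves independently, and 1 cycles 1->4->2 with period 3;
--     so compute each element's first-1 time, then all elements are 1 simultaneously
--     iff those times agree mod 3, at step max(times).  (Return value only: A also
--     mutates the caller's list in place; B does not.)"""
--     times = []
--     for x in arr:
--         t = 0
--         seen = set()
--         while x != 1: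
--             if x in seen:
--                 return -1
--             seen.add(x)
--             x = 3 * x + 1 if x % 2 else x // 2
--             t += 1
--         times.append(t)
--     if any(t % 3 != times[0] % 3 for t in times):
--         return -1
--     return max(times) if times else 0
-- ===== Notes on version B (the rewrite author's own statement) =====
-- stated objective: faster
-- what changed: A simulates the whole array in lockstep, storing every array state in a set for cycle detection; B computes each element's first time of reaching 1 independently (per-element cycle detection) and combines them arithmetically: since 1 cycles 1->4->2 with period 3, all elements are 1 simultaneously iff the first-1 times agree mod 3, and then the answer is their maximum.
import Mathlib
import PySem

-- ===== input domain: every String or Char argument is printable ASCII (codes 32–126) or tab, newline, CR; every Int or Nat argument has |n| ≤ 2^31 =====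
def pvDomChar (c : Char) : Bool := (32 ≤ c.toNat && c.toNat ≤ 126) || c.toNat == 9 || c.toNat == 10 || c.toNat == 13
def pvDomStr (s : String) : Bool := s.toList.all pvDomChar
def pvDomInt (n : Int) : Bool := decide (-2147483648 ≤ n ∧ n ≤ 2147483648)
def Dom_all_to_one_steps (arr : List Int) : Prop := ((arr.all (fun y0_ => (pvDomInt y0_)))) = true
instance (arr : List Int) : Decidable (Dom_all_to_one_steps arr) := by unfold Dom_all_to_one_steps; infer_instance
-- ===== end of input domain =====

-- B replaces A's lockstep whole-array simulation (with a set of seen array states) by independent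
-- per-element first-1 times combined via mod-3 residues (objective: faster). Return value only:
-- Python A also mutates the caller's list in place, B does not.

-- ===== PORT A =====
def collatz_transform : List Int → List Int
  | [] => []
  | a0 :: rest =>
      (if PySem.Int.mod a0 2 == 0 then PySem.Int.floordiv a0 2 else 3 * a0 + 1) ::
        collatz_transform rest

def pvFuel : Nat := 10000  -- fuel guard making Python's `while True` loop total; nothing more

def aLoop : Nat → List Int → PySem.Set (List Int) → Int → Int
  | 0, _, _, _ => -1
  | fuel + 1, arr, seen_states, steps =>
      if arr.all (fun x => x == 1) then steps
      else if PySem.Set.contains seen_states arr then -1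
      else aLoop fuel (collatz_transform arr) (PySem.Set.add seen_states arr) (steps + 1)

def all_to_one_steps (arr : List Int) : Int :=
  aLoop pvFuel arr PySem.Set.empty 0

-- ===== PORT B =====
-- inner `while x != 1` loop of Source B (fuel guard for totality only; early `return -1` = none)
def bFirstOne : Nat → Int → PySem.Set Int → Int → Option Int
  | 0, _, _, _ => none
  | fuel + 1, x, seen, t =>
      if x == 1 then some t
      else if PySem.Set.contains seen x then none
      else bFirstOne fuel
        (if !(PySem.Int.mod x 2 == 0) then 3 * x + 1 else PySem.Int.floordiv x 2)
        (PySem.Set.add seen x) (t + 1)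

def all_to_one_steps_alt (arr : List Int) : Int :=
  match arr.mapM (fun x => bFirstOne pvFuel x PySem.Set.empty 0) with
  | none => -1
  | some times =>
      -- `times[0]` is only reached by Python when `times` is nonempty; headD's default is never used
      if times.any (fun t => !(PySem.Int.mod t 3 == PySem.Int.mod (times.headD 0) 3)) then -1
      else
        match times with
        | [] => 0
        | t0 :: ts => (PySem.List.max? (t0 :: ts) (fun y => y)).getD 0

-- ===== PRECONDITION & SPEC =====
def Spec_all_to_one_steps (arr : List Int) (out : Int) : Prop := out = all_to_one_steps_alt arr
instance (arr : List Int) (out : Int) : Decidable (Spec_all_to_one_steps arr out) := by unfold Spec_all_to_one_steps; infer_instance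

-- ===== CLAIM (what is proved, stated in full; the proofs are below) =====
def Claim_equal_all_to_one_steps : Prop := ∀ (arr : List Int), Dom_all_to_one_steps arr → Spec_all_to_one_steps arr (all_to_one_steps arr)

-- ===== LEMMAS AND PROOFS =====

/-- The common per-element step function, in plain `Int` arithmetic (2 > 0, so
`PySem.Int.mod`/`floordiv` by 2 are Lean's `%`/`/`). -/
def pstep (x : Int) : Int := if x % 2 = 0 then x / 2 else 3 * x + 1

lemma astep_eq (x : Int) :
    (if PySem.Int.mod x 2 == 0 then PySem.Int.floordiv x 2 else 3 * x + 1) = pstep x := by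
  rw [PySem.Int.mod_eq_emod_of_pos (by norm_num), PySem.Int.floordiv_eq_ediv_of_pos (by norm_num)]
  simp [pstep]

lemma bstep_eq (x : Int) :
    (if !(PySem.Int.mod x 2 == 0) then 3 * x + 1 else PySem.Int.floordiv x 2) = pstep x := by
  rw [PySem.Int.mod_eq_emod_of_pos (by norm_num), PySem.Int.floordiv_eq_ediv_of_pos (by norm_num)]
  by_cases h : x % 2 = 0 <;> simp [pstep, h]

lemma ct_eq : ∀ l : List Int, collatz_transform l = l.map pstep
  | [] => rfl
  | x :: r => by
      show (if PySem.Int.mod x 2 == 0 then PySem.Int.floordiv x 2 else 3 * x + 1) ::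
          collatz_transform r = _
      rw [astep_eq, ct_eq r, List.map_cons]

lemma mod3_eq (b : Int) : PySem.Int.mod b 3 = b % 3 :=
  PySem.Int.mod_eq_emod_of_pos (by norm_num)

lemma pstep_one : pstep 1 = 4 := by norm_num [pstep]
lemma pstep_four : pstep 4 = 2 := by norm_num [pstep]
lemma pstep_two : pstep 2 = 1 := by norm_num [pstep]
lemma pstep_zero : pstep 0 = 0 := by norm_num [pstep]

lemma pstep_fix {u : Int} (h : pstep u = u) : u = 0 := by
  unfold pstep at h
  split_ifs at h with hp <;> omega

lemma cyc (k : Nat) :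
    pstep^[k] (1 : Int) = if k % 3 = 0 then 1 else if k % 3 = 1 then 4 else 2 := by
  induction k with
  | zero => simp
  | succ k ih =>
    rw [Function.iterate_succ_apply', ih]
    rcases (by omega : k % 3 = 0 ∨ k % 3 = 1 ∨ k % 3 = 2) with h | h | h
    · have h1 : (k + 1) % 3 = 1 := by omega
      simp [h, h1, pstep_one]
    · have h1 : (k + 1) % 3 = 2 := by omega
      simp [h, h1, pstep_four]
    · have h1 : (k + 1) % 3 = 0 := by omega
      simp [h, h1, pstep_two]

lemma one_orbit (j : Nat) :
    pstep^[j] (1 : Int) = 1 ∨ pstep^[j] (1 : Int) = 4 ∨ pstep^[j] (1 : Int) = 2 := by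
  rw [cyc]; split_ifs <;> simp

lemma iter2_four : pstep^[2] (4 : Int) = 1 := by
  show pstep (pstep 4) = 1
  rw [pstep_four, pstep_two]

lemma iter2_zero : pstep^[2] (0 : Int) = 0 := by
  show pstep (pstep 0) = 0
  rw [pstep_zero, pstep_zero]

/-- If the value at time `s` lies on the 1-cycle, then 1 is hit by time `s + 2`. -/
lemma one_near {x : Int} {s : Nat}
    (h : pstep^[s] x = 1 ∨ pstep^[s] x = 4 ∨ pstep^[s] x = 2) :
    ∃ j, j ≤ s + 2 ∧ pstep^[j] x = 1 := by
  rcases h with h | h | h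
  · exact ⟨s, by omega, h⟩
  · refine ⟨s + 2, by omega, ?_⟩
    have : pstep^[s + 2] x = pstep^[2] (pstep^[s] x) := by
      rw [← Function.iterate_add_apply]; congr 1; omega
    rw [this, h, iter2_four]
  · refine ⟨s + 1, by omega, ?_⟩
    rw [Function.iterate_succ_apply', h, pstep_two]

/-- A repeat in a trajectory makes every later value a copy of an earlier one. -/
lemma per_rep {x : Int} {j k : Nat} (hjk : j < k) (h : pstep^[j] x = pstep^[k] x) :
    ∀ t, ∃ s, s < k ∧ pstep^[t] x = pstep^[s] x := by
  intro t
  induction t using Nat.strong_induction_on with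
  | _ t ih =>
    by_cases hlt : t < k
    · exact ⟨t, hlt, rfl⟩
    · have h1 : pstep^[t] x = pstep^[t - k + j] x := by
        calc pstep^[t] x = pstep^[t - k] (pstep^[k] x) := by
              rw [← Function.iterate_add_apply]; congr 1; omega
          _ = pstep^[t - k] (pstep^[j] x) := by rw [h]
          _ = pstep^[t - k + j] x := by rw [← Function.iterate_add_apply]
      obtain ⟨s, hs, he⟩ := ih (t - k + j) (by omega)
      exact ⟨s, hs, h1.trans he⟩

/-- A trajectory that repeats (time `s` vs `t`) and ever hits 1 hits 1 by time `s + 2`. -/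
lemma near_one_of_repeat {x : Int} {s t k : Nat} (hst : s < t)
    (hrep : pstep^[s] x = pstep^[t] x) (hk : pstep^[k] x = 1) :
    ∃ j, j ≤ s + 2 ∧ pstep^[j] x = 1 := by
  by_cases hks : k ≤ s
  · apply one_near (x := x) (s := s)
    have hs1 : pstep^[s] x = pstep^[s - k] (1 : Int) := by
      rw [← hk, ← Function.iterate_add_apply]; congr 1; omega
    rw [hs1]; exact one_orbit (s - k)
  · -- k > s: the value at s is purely periodic (period p = t - s) and reaches 1
    have hpu : pstep^[t - s] (pstep^[s] x) = pstep^[s] x := by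
      rw [← Function.iterate_add_apply, (by omega : t - s + s = t)]
      exact hrep.symm
    have hmul : ∀ m, pstep^[(t - s) * m] (pstep^[s] x) = pstep^[s] x := by
      intro m
      induction m with
      | zero => simp
      | succ m ih =>
        rw [(by ring : (t - s) * (m + 1) = (t - s) * m + (t - s)),
          Function.iterate_add_apply, hpu, ih]
    have hone : pstep^[k - s] (pstep^[s] x) = 1 := by
      rw [← Function.iterate_add_apply, (by omega : k - s + s = k)]
      exact hk
    have hbig : k - s ≤ (t - s) * k := by
      calc k - s ≤ k := by omega
        _ = 1 * k := by ring
        _ ≤ (t - s) * k := Nat.mul_le_mul_right _ (by omega)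
    have hval : pstep^[s] x = pstep^[(t - s) * k - (k - s)] (1 : Int) := by
      have e1 : (t - s) * k = ((t - s) * k - (k - s)) + (k - s) :=
        (Nat.sub_add_cancel hbig).symm
      calc pstep^[s] x
          = pstep^[((t - s) * k - (k - s)) + (k - s)] (pstep^[s] x) := by
            rw [← e1]; exact (hmul k).symm
        _ = pstep^[(t - s) * k - (k - s)] (pstep^[k - s] (pstep^[s] x)) :=
            Function.iterate_add_apply ..
        _ = pstep^[(t - s) * k - (k - s)] (1 : Int) := by rw [hone]
    apply one_near (x := x) (s := s)
    rw [hval]; exact one_orbit _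

/-- Residue characterisation: if `k` is the first 1-time, any other 1-time is `k + 3·j`. -/
lemma resid_of_one {x : Int} {k t : Nat} (hk : pstep^[k] x = 1)
    (hmin : ∀ j, j < k → pstep^[j] x ≠ 1) (ht : pstep^[t] x = 1) :
    k ≤ t ∧ (t - k) % 3 = 0 := by
  have hkt : k ≤ t := by
    by_contra h
    exact hmin t (by omega) ht
  have h1 : pstep^[t - k] (1 : Int) = 1 := by
    rw [← hk, ← Function.iterate_add_apply, (by omega : t - k + k = t), hk]
    exact ht
  rw [cyc] at h1
  constructor
  · exact hkt
  · by_contra h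
    rcases (by omega : (t - k) % 3 = 1 ∨ (t - k) % 3 = 2) with h2 | h2 <;>
      simp [h2] at h1
  
lemma one_of_resid {x : Int} {k t : Nat} (hk : pstep^[k] x = 1)
    (hkt : k ≤ t) (h3 : (t - k) % 3 = 0) : pstep^[t] x = 1 := by
  have : pstep^[t] x = pstep^[t - k] (pstep^[k] x) := by
    rw [← Function.iterate_add_apply]; congr 1; omega
  rw [this, hk, cyc, h3]; simp

-- ===== B-side loop characterisation =====

lemma bFirstOne_some :
    ∀ (f : Nat) (x : Int) (seen : PySem.Set Int) (c r : Int),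
      bFirstOne f x seen c = some r →
      ∃ k : Nat, r = c + (k : Int) ∧ k < f ∧ pstep^[k] x = 1 ∧
        ∀ j, j < k → pstep^[j] x ≠ 1 := by
  intro f
  induction f with
  | zero => intro x seen c r h; simp [bFirstOne] at h
  | succ f ih =>
    intro x seen c r h
    rw [bFirstOne] at h
    by_cases h1 : x = 1
    · subst h1
      simp at h
      exact ⟨0, by omega, by omega, by simp, by omega⟩
    · rw [if_neg (by simpa using h1)] at h
      by_cases h2 : PySem.Set.contains seen x = true
      · rw [if_pos h2] at h; cases h
      · rw [if_neg h2, bstep_eq] at h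
        obtain ⟨k, hr, hkf, hone, hmin⟩ := ih _ _ _ _ h
        refine ⟨k + 1, by push_cast; omega, by omega, ?_, ?_⟩
        · rw [Function.iterate_succ_apply]; exact hone
        · intro j hj
          cases j with
          | zero => simpa using h1
          | succ j => rw [Function.iterate_succ_apply]; exact hmin j (by omega)

lemma bFirstOne_none :
    ∀ (f k : Nat) (x0 : Int) (seen : PySem.Set Int) (c : Int),
      (∀ j, j < k → pstep^[j] x0 ≠ 1) →
      (∀ y, y ∈ seen → ∃ j, j < k ∧ pstep^[j] x0 = y) →
      bFirstOne f (pstep^[k] x0) seen c = none →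
      ∀ t, t < k + f → pstep^[t] x0 ≠ 1 := by
  intro f
  induction f with
  | zero => intro k x0 seen c hmin _ _ t ht; exact hmin t (by omega)
  | succ f ih =>
    intro k x0 seen c hmin hseen h t ht
    rw [bFirstOne] at h
    by_cases h1 : pstep^[k] x0 = 1
    · rw [if_pos (by simpa using h1)] at h; cases h
    · rw [if_neg (by simpa using h1)] at h
      by_cases h2 : PySem.Set.contains seen (pstep^[k] x0) = true
      · -- repeated value: the whole trajectory stays among the first k values, none of them 1
        have hmem : pstep^[k] x0 ∈ seen := by
          simpa [PySem.Set.contains, List.contains_iff_mem] using h2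
        obtain ⟨j, hj, hje⟩ := hseen _ hmem
        obtain ⟨s, hs, he⟩ := per_rep hj hje t
        rw [he]; exact hmin s hs
      · rw [if_neg h2, bstep_eq] at h
        have h' : bFirstOne f (pstep^[k + 1] x0)
            (PySem.Set.add seen (pstep^[k] x0)) (c + 1) = none := by
          rw [Function.iterate_succ_apply']; exact h
        refine ih (k + 1) x0 _ (c + 1) ?_ ?_ h' t (by omega)
        · intro j hj
          rcases (by omega : j < k ∨ j = k) with hj' | rfl
          · exact hmin j hj'
          · exact h1
        · intro y hy
          rcases (PySem.Set.mem_add seen (pstep^[k] x0) y).mp hy with hy' | rfl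
          · obtain ⟨j, hj, hje⟩ := hseen y hy'
            exact ⟨j, by omega, hje⟩
          · exact ⟨k, by omega, rfl⟩

-- ===== A-side loop characterisation =====

lemma shift_map (arr : List Int) (t : Nat) :
    List.map (pstep^[t]) (List.map pstep arr) = List.map (pstep^[t + 1]) arr := by
  rw [List.map_map]
  apply List.map_congr_left
  intro x _
  exact (Function.iterate_succ_apply pstep t x).symm

lemma aLoop_run :
    ∀ (T f : Nat) (arr : List Int) (seen : PySem.Set (List Int)) (steps : Int),
      T < f →
      (∀ t, t < T → ¬ ((List.map (pstep^[t]) arr).all (fun x => x == 1) = true)) →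
      ((List.map (pstep^[T]) arr).all (fun x => x == 1) = true) →
      (∀ t, t < T → List.map (pstep^[t]) arr ∉ seen) →
      (∀ s t, s < t → t < T →
        List.map (pstep^[s]) arr ≠ List.map (pstep^[t]) arr) →
      aLoop f arr seen steps = steps + (T : Int) := by
  intro T
  induction T with
  | zero =>
    intro f arr seen steps hf h1 h2 h3 h4
    obtain ⟨f', rfl⟩ : ∃ f', f = f' + 1 := ⟨f - 1, by omega⟩
    have h2' : arr.all (fun x => x == 1) = true := by simpa using h2
    rw [aLoop, if_pos h2']
    simp
  | succ T ih =>
    intro f arr seen steps hf h1 h2 h3 h4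
    obtain ⟨f', rfl⟩ : ∃ f', f = f' + 1 := ⟨f - 1, by omega⟩
    have hA : ¬ (arr.all (fun x => x == 1) = true) := by
      have := h1 0 (by omega); simpa using this
    have hS : ¬ (PySem.Set.contains seen arr = true) := by
      have := h3 0 (by omega)
      simpa [PySem.Set.contains, List.contains_iff_mem] using this
    rw [aLoop, if_neg hA, if_neg hS, ct_eq]
    have step := ih f' (List.map pstep arr) (PySem.Set.add seen arr) (steps + 1)
      (by omega)
      (by intro t ht; rw [shift_map]; exact h1 (t + 1) (by omega))
      (by rw [shift_map]; exact h2)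
      (by
        intro t ht
        rw [shift_map]
        intro hmem
        rcases (PySem.Set.mem_add seen arr _).mp hmem with hm | hm
        · exact h3 (t + 1) (by omega) hm
        · have harr : arr = List.map (pstep^[0]) arr := by simp
          exact h4 0 (t + 1) (by omega) (by omega) (harr ▸ hm.symm) )
      (by
        intro s t hst htT
        rw [shift_map, shift_map]
        exact h4 (s + 1) (t + 1) (by omega) (by omega))
    rw [step]
    push_cast
    ring

lemma aLoop_neg :
    ∀ (f : Nat) (arr : List Int) (seen : PySem.Set (List Int)) (steps : Int),
      (∀ t, t < f → ¬ ((List.map (pstep^[t]) arr).all (fun x => x == 1) = true)) →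
      aLoop f arr seen steps = -1 := by
  intro f
  induction f with
  | zero => intro arr seen steps _; rfl
  | succ f ih =>
    intro arr seen steps h
    have hA : ¬ (arr.all (fun x => x == 1) = true) := by
      have := h 0 (by omega); simpa using this
    rw [aLoop, if_neg hA]
    by_cases hS : PySem.Set.contains seen arr = true
    · rw [if_pos hS]
    · rw [if_neg hS, ct_eq]
      apply ih
      intro t ht
      rw [shift_map]
      exact h (t + 1) (by omega)

-- ===== mapM / Forall₂ glue =====

lemma mapM_some :
    ∀ (l ts : List Int) (f : Int → Option Int),
      l.mapM f = some ts → List.Forall₂ (fun x t => f x = some t) l ts := by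
  intro l
  induction l with
  | nil =>
    intro ts f h
    simp only [List.mapM_nil, pure, Option.some.injEq] at h
    subst h
    exact .nil
  | cons a l ih =>
    intro ts f h
    rw [List.mapM_cons] at h
    cases ha : f a with
    | none => rw [ha] at h; simp at h
    | some b =>
      rw [ha] at h
      cases hl : l.mapM f with
      | none => rw [hl] at h; simp at h
      | some bs =>
        rw [hl] at h
        simp only [Option.some.injEq, bind, Option.bind, pure] at h
        cases h
        exact .cons ha (ih bs f hl)

lemma mapM_none :
    ∀ (l : List Int) (f : Int → Option Int),
      l.mapM f = none → ∃ x ∈ l, f x = none := by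
  intro l
  induction l with
  | nil => intro f h; simp [List.mapM_nil, pure] at h
  | cons a l ih =>
    intro f h
    rw [List.mapM_cons] at h
    cases ha : f a with
    | none => exact ⟨a, List.mem_cons_self .., ha⟩
    | some b =>
      rw [ha] at h
      cases hl : l.mapM f with
      | none =>
        obtain ⟨x, hx, hfx⟩ := ih f hl
        exact ⟨x, List.mem_cons_of_mem _ hx, hfx⟩
      | some bs => rw [hl] at h; simp [bind, Option.bind, pure] at h

lemma forall₂_mem_right {α β : Type} {R : α → β → Prop} :
    ∀ {l1 : List α} {l2 : List β}, List.Forall₂ R l1 l2 → ∀ {b}, b ∈ l2 → ∃ a ∈ l1, R a b := by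
  intro l1 l2 h
  induction h with
  | nil => intro b hb; cases hb
  | cons hr _ ih =>
    intro b hb
    rcases List.mem_cons.mp hb with rfl | hb
    · exact ⟨_, List.mem_cons_self .., hr⟩
    · obtain ⟨a, ha, hab⟩ := ih hb
      exact ⟨a, List.mem_cons_of_mem _ ha, hab⟩

lemma forall₂_mem_left {α β : Type} {R : α → β → Prop} :
    ∀ {l1 : List α} {l2 : List β}, List.Forall₂ R l1 l2 → ∀ {a}, a ∈ l1 → ∃ b ∈ l2, R a b := by
  intro l1 l2 h
  induction h with
  | nil => intro a ha; cases ha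
  | cons hr _ ih =>
    intro a ha
    rcases List.mem_cons.mp ha with rfl | ha
    · exact ⟨_, List.mem_cons_self .., hr⟩
    · obtain ⟨b, hb, hab⟩ := ih ha
      exact ⟨b, List.mem_cons_of_mem _ hb, hab⟩

-- ===== main equivalence =====

lemma alt_none {arr : List Int}
    (h : arr.mapM (fun x => bFirstOne pvFuel x PySem.Set.empty 0) = none) :
    all_to_one_steps_alt arr = -1 := by
  unfold all_to_one_steps_alt
  rw [h]

lemma alt_some {arr times : List Int}
    (h : arr.mapM (fun x => bFirstOne pvFuel x PySem.Set.empty 0) = some times) :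
    all_to_one_steps_alt arr =
      if times.any (fun t => !(PySem.Int.mod t 3 == PySem.Int.mod (times.headD 0) 3)) then -1
      else (PySem.List.max? times (fun y => y)).getD 0 := by
  unfold all_to_one_steps_alt
  simp only [h]
  cases times <;> rfl

theorem ab_eq (arr : List Int) : all_to_one_steps arr = all_to_one_steps_alt arr := by
  unfold all_to_one_steps
  rcases hm : arr.mapM (fun x => bFirstOne pvFuel x PySem.Set.empty 0) with _ | times
  · rw [alt_none hm]
    -- some element never reaches 1 within the fuel: both sides give -1
    obtain ⟨x, hx, hnone⟩ := mapM_none arr _ hm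
    have hne1 : ∀ t, t < pvFuel → pstep^[t] x ≠ 1 := by
      have h0 : bFirstOne pvFuel (pstep^[0] x) PySem.Set.empty 0 = none := by
        simpa using hnone
      have hb := bFirstOne_none pvFuel 0 x PySem.Set.empty 0
        (by intro j hj; omega) (by intro y hy; cases hy) h0
      intro t ht
      exact hb t (by omega)
    rw [aLoop_neg]
    intro t ht hall
    exact hne1 t ht (by simpa using List.all_eq_true.mp hall _ (List.mem_map_of_mem hx))
  · rw [alt_some hm]
    have hforall := mapM_some arr times _ hm
    by_cases hany :
        times.any (fun t => !(PySem.Int.mod t 3 == PySem.Int.mod (times.headD 0) 3)) = true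
    · -- two elements whose first-1 times disagree mod 3: all-ones never happens
      rw [if_pos hany]
      obtain ⟨b0, hb0mem, hb0⟩ := List.any_eq_true.mp hany
      have hb0' : ¬ PySem.Int.mod b0 3 = PySem.Int.mod (times.headD 0) 3 := by
        simpa using hb0
      obtain ⟨bh, hbhmem, hbh⟩ : ∃ bh ∈ times, bh = times.headD 0 := by
        cases times with
        | nil => cases hb0mem
        | cons c cs => exact ⟨c, List.mem_cons_self .., rfl⟩
      obtain ⟨x0, hx0, hfx0⟩ := forall₂_mem_right hforall hb0mem
      obtain ⟨xh, hxh, hfxh⟩ := forall₂_mem_right hforall hbhmem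
      obtain ⟨k0, hk0r, _, hk0one, hk0min⟩ := bFirstOne_some _ _ _ _ _ hfx0
      obtain ⟨kh, hkhr, _, hkhone, hkhmin⟩ := bFirstOne_some _ _ _ _ _ hfxh
      apply aLoop_neg
      intro t ht hall
      have h0 : pstep^[t] x0 = 1 := by
        simpa using List.all_eq_true.mp hall _ (List.mem_map_of_mem hx0)
      have hh : pstep^[t] xh = 1 := by
        simpa using List.all_eq_true.mp hall _ (List.mem_map_of_mem hxh)
      obtain ⟨hle0, hm0⟩ := resid_of_one hk0one hk0min h0
      obtain ⟨hleh, hmh⟩ := resid_of_one hkhone hkhmin hh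
      apply hb0'
      rw [hk0r, ← hbh, hkhr, mod3_eq, mod3_eq]
      omega
    · rw [if_neg hany]
      have hres : ∀ b ∈ times, PySem.Int.mod b 3 = PySem.Int.mod (times.headD 0) 3 := by
        intro b hb
        by_contra hne
        exact hany (List.any_eq_true.mpr ⟨b, hb, by simpa using hne⟩)
      cases times with
      | nil =>
        show _ = (0 : Int)
        cases hforall
        have h := aLoop_run 0 pvFuel [] PySem.Set.empty 0 (by norm_num [pvFuel])
          (by intro t ht; omega) (by simp)
          (by intro t ht; omega) (by intro s t hs ht; omega)
        simpa using h
      | cons t0 ts =>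
        show _ = (PySem.List.max? (t0 :: ts) (fun y => y)).getD 0
        rw [PySem.List.max?_id_cons]
        have hMmem : ts.foldl max t0 ∈ t0 :: ts := by
          rcases PySem.List.foldl_max_mem ts t0 with h | h
          · rw [h]; exact List.mem_cons_self ..
          · exact List.mem_cons_of_mem _ h
        have hMmax : ∀ y ∈ t0 :: ts, y ≤ ts.foldl max t0 := by
          intro y hy
          rcases List.mem_cons.mp hy with rfl | hy
          · exact (PySem.List.le_foldl_max ts y).1
          · exact (PySem.List.le_foldl_max ts t0).2 y hy
        obtain ⟨xm, hxm, hfxm⟩ := forall₂_mem_right hforall hMmem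
        obtain ⟨K, hKr, hKf, hKone, hKmin⟩ := bFirstOne_some _ _ _ _ _ hfxm
        have hMK : ts.foldl max t0 = (K : Int) := by rw [hKr]; ring
        -- every element reaches 1 first at some k ≤ K with k ≡ K (mod 3)
        have helem : ∀ x ∈ arr, ∃ k : Nat, k ≤ K ∧ (K - k) % 3 = 0 ∧
            pstep^[k] x = 1 ∧ ∀ j, j < k → pstep^[j] x ≠ 1 := by
          intro x hx
          obtain ⟨b, hb, hfb⟩ := forall₂_mem_left hforall hx
          obtain ⟨k, hkr, _, hkone, hkmin⟩ := bFirstOne_some _ _ _ _ _ hfb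
          have hbK : b ≤ ts.foldl max t0 := hMmax b hb
          have hrb := hres b hb
          have hrM := hres _ hMmem
          rw [hkr] at hbK hrb
          rw [hMK] at hbK hrM
          rw [mod3_eq, mod3_eq] at hrb hrM
          exact ⟨k, by omega, by omega, hkone, hkmin⟩
        have hrun := aLoop_run K pvFuel arr PySem.Set.empty 0 hKf
          (by -- no all-ones before K: the element xm is not yet 1
            intro t ht hall
            exact hKmin t ht
              (by simpa using List.all_eq_true.mp hall _ (List.mem_map_of_mem hxm)))
          (by -- all ones at K
            apply List.all_eq_true.mpr
            intro y hy
            obtain ⟨x, hx, rfl⟩ := List.mem_map.mp hy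
            obtain ⟨k, hkK, hk3, hkone, _⟩ := helem x hx
            simpa using one_of_resid hkone hkK hk3)
          (by intro t ht hmem; simp [PySem.Set.empty] at hmem)
          (by -- no repeated array state strictly before K
            intro s t hst htK heq
            have hmapeq : ∀ x ∈ arr, pstep^[s] x = pstep^[t] x :=
              fun x hx => List.map_inj_left.mp heq x hx
            -- every element's first-1 time is then ≤ s+2, so K ≤ s+2
            have hK2 : K ≤ s + 2 := by
              obtain ⟨j, hj, hj1⟩ :=
                near_one_of_repeat hst (hmapeq xm hxm) hKone
              by_contra hgt
              exact hKmin j (by omega) hj1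
            have hts : t = s + 1 := by omega
            have hKs : K = s + 2 := by omega
            have hfix : pstep (pstep^[s] xm) = pstep^[s] xm := by
              have h1 := hmapeq xm hxm
              rw [hts, Function.iterate_succ_apply'] at h1
              exact h1.symm
            have h0 : pstep^[s] xm = 0 := pstep_fix hfix
            have hz : pstep^[K] xm = 0 := by
              rw [hKs, (by omega : s + 2 = 2 + s), Function.iterate_add_apply, h0,
                iter2_zero]
            rw [hKone] at hz
            exact absurd hz (by norm_num))
        rw [hrun, hMK]
        simp

-- ===== VERDICT (by name: the statement is the Claim_ definition above) =====
theorem all_to_one_steps_spec : Claim_equal_all_to_one_steps := by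
  intro arr _
  unfold Spec_all_to_one_steps
  exact ab_eq arr
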